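-- pv_equiv track=rewrite | github.com/AyushKumar1810/Assigmnet_Ayush-Kumar | test.py | num_islands_with_diagonals
-- ===== SOURCE A (Python) =====
-- def num_islands_with_diagonals(grid):
--     n, m = len(grid), len(grid[0])
--     visited = [[False]*m for _ in range(n)]
--
--     def dfs(i, j):
--         if i < 0 or j < 0 or i >= n or j >= m or visited[i][j] or grid[i][j] == 0:
--             return
--         visited[i][j] = True
--         for dx, dy in [(-1,0),(1,0),(0,-1),(0,1),(-1,-1),(-1,1),(1,-1),(1,1)]:
--             dfs(i + dx, j + dy)
--
--     count = 0
--     for i in range(n):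
--         for j in range(m):
--             if grid[i][j] == 1 and not visited[i][j]:
--                 dfs(i, j)
--                 count += 1
--     return count
-- ===== SOURCE B (Python) =====
-- def num_islands_with_diagonals(grid):
--     n, m = len(grid), len(grid[0])
--     visited = set()
--     count = 0
--     for i in range(n):
--         for j in range(m):
--             if grid[i][j] == 1 and (i, j) not in visited:
--                 count += 1
--                 stack = [(i, j)]
--                 while stack:
--                     x, y = stack.pop()
--                     if x < 0 or y < 0 or x >= n or y >= m or (x, y) in visited or grid[x][y] == 0:
--                         continue
--                     visited.add((x, y))
--                     for dx, dy in [(1,1),(1,-1),(-1,1),(-1,-1),(0,1),(0,-1),(1,0),(-1,0)]: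
--                         stack.append((x + dx, y + dy))
--     return count
-- ===== Notes on version B (the rewrite author's own statement) =====
-- stated objective: alternative
-- what changed: Replaces the recursive DFS flood fill (and the boolean visited matrix) with an explicit-stack iterative flood fill over a visited set, avoiding deep recursion.
import Mathlib
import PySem

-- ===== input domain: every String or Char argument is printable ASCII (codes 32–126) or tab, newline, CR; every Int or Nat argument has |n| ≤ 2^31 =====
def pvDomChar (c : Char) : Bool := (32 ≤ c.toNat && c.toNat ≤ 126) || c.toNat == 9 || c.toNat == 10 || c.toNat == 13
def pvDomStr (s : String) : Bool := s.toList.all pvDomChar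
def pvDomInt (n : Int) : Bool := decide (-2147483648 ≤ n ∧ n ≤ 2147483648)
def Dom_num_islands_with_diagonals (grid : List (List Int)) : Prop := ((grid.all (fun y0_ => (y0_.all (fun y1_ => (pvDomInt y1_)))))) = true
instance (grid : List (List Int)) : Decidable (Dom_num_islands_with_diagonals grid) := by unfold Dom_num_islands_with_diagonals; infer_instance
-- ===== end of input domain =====

-- B replaces A's recursive DFS flood fill (boolean visited matrix) by an explicit-stack
-- iterative flood fill over a visited set; same counts, no deep recursion (objective: alternative).

-- shared helpers: cell access grid[i][j], the 8 directions, the in-range cells, #unvisited cells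
def pvCell (grid : List (List Int)) (i j : Int) : Int :=
  PySem.List.pyGetD (PySem.List.pyGetD grid i []) j 0

def pvDirs : List (Int × Int) := [(-1,0),(1,0),(0,-1),(0,1),(-1,-1),(-1,1),(1,-1),(1,1)]

def pvAll (n m : Int) : List (Int × Int) :=
  (PySem.List.pyRange 0 n 1).flatMap (fun i => (PySem.List.pyRange 0 m 1).map (fun j => (i, j)))

def pvUnvis (n m : Int) (v : List (Int × Int)) : Nat :=
  (pvAll n m).countP (fun p => decide (p ∉ v))

-- ===== PORT A ===== (recursive dfs, ported with a fuel guard that only makes it total: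
-- the fuel (pvAll n m).length + 1 strictly exceeds the recursion depth, see pvDfsA_fuel below)
def pvDfsA (grid : List (List Int)) (n m : Int) : Nat → List (Int × Int) → Int → Int → List (Int × Int)
  | 0, v, _, _ => v
  | Nat.succ f, v, i, j =>
    if i < 0 ∨ j < 0 ∨ n ≤ i ∨ m ≤ j ∨ (i, j) ∈ v ∨ pvCell grid i j = 0 then v
    else pvDirs.foldl (fun acc d => pvDfsA grid n m f acc (i + d.1) (j + d.2)) ((i, j) :: v)

def num_islands_with_diagonals (grid : List (List Int)) : Int :=
  let n : Int := grid.length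
  let m : Int := (grid.headD []).length
  ((PySem.List.pyRange 0 n 1).foldl (fun st i =>
      (PySem.List.pyRange 0 m 1).foldl (fun st j =>
        if pvCell grid i j = 1 ∧ (i, j) ∉ st.1 then
          (pvDfsA grid n m ((pvAll n m).length + 1) st.1 i j, st.2 + 1)
        else st) st)
    (([] : List (Int × Int)), (0 : Int))).2

-- ===== PORT B ===== (explicit stack; terminates because each step pops one entry or marks a new cell)
def pvDirsB : List (Int × Int) := [(1,1),(1,-1),(-1,1),(-1,-1),(0,1),(0,-1),(1,0),(-1,0)]


-- strict decrease of the unvisited count when a fresh in-range cell is marked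
-- (cited by pvFlood's termination proof, hence placed before it)
theorem pv_countP_lt {α : Type} (p q : α → Bool) :
    ∀ (l : List α) (a : α), a ∈ l → p a = true → q a = false →
      (∀ x, q x = true → p x = true) → l.countP q < l.countP p := by
  intro l
  induction l with
  | nil => intro a ha; cases ha
  | cons b t ih =>
    intro a ha hpa hqa hmono
    simp only [List.countP_cons]
    rcases List.mem_cons.mp ha with rfl | hat
    · have hle : t.countP q ≤ t.countP p := List.countP_mono_left (fun x _ hx => hmono x hx)
      simp [hpa, hqa] <;> omega
    · have hlt := ih a hat hpa hqa hmono
      have : (if q b = true then 1 else 0) ≤ (if p b = true then 1 else 0) := by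
        by_cases hb : q b = true
        · simp [hb, hmono b hb]
        · simp [hb] <;> omega
      omega

theorem pvUnvis_cons_lt (n m i j : Int) (v : List (Int × Int))
    (hi0 : 0 ≤ i) (hin : i < n) (hj0 : 0 ≤ j) (hjm : j < m) (hnv : (i, j) ∉ v) :
    pvUnvis n m ((i, j) :: v) < pvUnvis n m v := by
  have hmem : (i, j) ∈ pvAll n m := by
    simp only [pvAll, List.mem_flatMap, List.mem_map, PySem.List.mem_pyRange_one]
    exact ⟨i, ⟨hi0, hin⟩, j, ⟨hj0, hjm⟩, rfl⟩
  exact pv_countP_lt _ _ (pvAll n m) (i, j) hmem (by simpa using hnv) (by simp)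
    (fun x hx => by
      simp only [List.mem_cons, not_or, decide_eq_true_eq] at hx ⊢
      exact hx.2)

def pvFlood (grid : List (List Int)) (n m : Int) : List (Int × Int) → List (Int × Int) → List (Int × Int)
  | [], v => v
  | (i, j) :: rest, v =>
    if h : i < 0 ∨ j < 0 ∨ n ≤ i ∨ m ≤ j ∨ (i, j) ∈ v ∨ pvCell grid i j = 0 then
      pvFlood grid n m rest v
    else
      pvFlood grid n m (pvDirsB.foldl (fun s d => (i + d.1, j + d.2) :: s) rest) ((i, j) :: v)
  termination_by stack v => 9 * pvUnvis n m v + stack.length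
  decreasing_by
    · simp
    · push_neg at h
      obtain ⟨hi0, hj0, hin, hjm, hnv, _⟩ := h
      have hlt := pvUnvis_cons_lt n m i j v hi0 hin hj0 hjm hnv
      have hlen : (pvDirsB.foldl (fun s d => (i + d.1, j + d.2) :: s) rest).length = rest.length + 8 := by
        simp [pvDirsB]
      simp only [hlen, List.length_cons]
      omega

def num_islands_with_diagonals_alt (grid : List (List Int)) : Int :=
  let n : Int := grid.length
  let m : Int := (grid.headD []).length
  ((PySem.List.pyRange 0 n 1).foldl (fun st i =>
      (PySem.List.pyRange 0 m 1).foldl (fun st j =>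
        if pvCell grid i j = 1 ∧ (i, j) ∉ st.1 then
          (pvFlood grid n m [(i, j)] st.1, st.2 + 1)
        else st) st)
    (([] : List (Int × Int)), (0 : Int))).2

-- ===== PRECONDITION & SPEC =====
-- Pre_ excludes exactly the inputs where A raises IndexError: the empty grid (grid[0]),
-- and grids with a row shorter than row 0 (the scan reads grid[i][j] for every j < len(grid[0])).
def Pre_num_islands_with_diagonals (grid : List (List Int)) : Prop :=
  grid ≠ [] ∧ ∀ row ∈ grid, (grid.headD []).length ≤ row.length
instance (grid : List (List Int)) : Decidable (Pre_num_islands_with_diagonals grid) := by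
  unfold Pre_num_islands_with_diagonals; infer_instance

def pvWitness_num_islands_with_diagonals : List (List Int) := [[1, 0, 1], [0, 1, 0]]

def Spec_num_islands_with_diagonals (grid : List (List Int)) (out : Int) : Prop := out = num_islands_with_diagonals_alt grid
instance (grid : List (List Int)) (out : Int) : Decidable (Spec_num_islands_with_diagonals grid out) := by unfold Spec_num_islands_with_diagonals; infer_instance

-- ===== CLAIM (what is proved, stated in full; the proofs are below) =====
def Claim_equal_num_islands_with_diagonals : Prop := ∀ (grid : List (List Int)), Dom_num_islands_with_diagonals grid → Pre_num_islands_with_diagonals grid → Spec_num_islands_with_diagonals grid (num_islands_with_diagonals grid)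

-- ===== LEMMAS AND PROOFS =====

-- dfs with self-sizing fuel, the common form both ports are reduced to
def pvDfsF (grid : List (List Int)) (n m : Int) (v : List (Int × Int)) (p : Int × Int) : List (Int × Int) :=
  pvDfsA grid n m (pvUnvis n m v + 1) v p.1 p.2

theorem pv_foldl_subset {α β : Type} (g : α → β → α) (R : α → α → Prop)
    (hrefl : ∀ a, R a a) (htrans : ∀ a b c, R a b → R b c → R a c)
    (hg : ∀ a x, R a (g a x)) : ∀ (l : List β) (a : α), R a (l.foldl g a) := by
  intro l
  induction l with
  | nil => intro a; exact hrefl a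
  | cons x t ih => intro a; exact htrans _ _ _ (hg a x) (ih (g a x))

theorem pvDfsA_subset (grid : List (List Int)) (n m : Int) :
    ∀ (f : Nat) (v : List (Int × Int)) (i j : Int), v ⊆ pvDfsA grid n m f v i j := by
  intro f
  induction f with
  | zero => intro v i j; simp [pvDfsA]
  | succ f ih =>
    intro v i j
    simp only [pvDfsA]
    split
    · exact List.Subset.refl v
    · exact fun a ha =>
        pv_foldl_subset _ (· ⊆ ·) (fun _ => List.Subset.refl _)
          (fun _ _ _ => List.Subset.trans)
          (fun acc d => ih acc (i + d.1) (j + d.2)) pvDirs ((i, j) :: v)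
          (List.mem_cons_of_mem _ ha)

theorem pvUnvis_anti (n m : Int) {v w : List (Int × Int)} (h : v ⊆ w) :
    pvUnvis n m w ≤ pvUnvis n m v := by
  unfold pvUnvis
  exact List.countP_mono_left (fun x _ hx => by
    simp only [decide_eq_true_eq] at hx ⊢
    exact fun hv => hx (h hv))

theorem pvUnvis_dfs_le (grid : List (List Int)) (n m : Int) (f : Nat) (v : List (Int × Int)) (i j : Int) :
    pvUnvis n m (pvDfsA grid n m f v i j) ≤ pvUnvis n m v :=
  pvUnvis_anti n m (pvDfsA_subset grid n m f v i j)

theorem pv_foldl_congr_inv {α β : Type} (P : α → Prop) (g g' : α → β → α) :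
    ∀ (l : List β) (a : α), P a → (∀ x a', P a' → g a' x = g' a' x ∧ P (g a' x)) →
      l.foldl g a = l.foldl g' a := by
  intro l
  induction l with
  | nil => intro a _ _; rfl
  | cons x t ih =>
    intro a ha hstep
    have h1 := hstep x a ha
    simp only [List.foldl_cons, h1.1]
    exact ih (g' a x) (h1.1 ▸ h1.2) hstep

theorem pvDfsA_fuel (grid : List (List Int)) (n m : Int) :
    ∀ (f f' : Nat) (v : List (Int × Int)) (i j : Int),
      pvUnvis n m v < f → pvUnvis n m v < f' →
      pvDfsA grid n m f v i j = pvDfsA grid n m f' v i j := by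
  intro f
  induction f with
  | zero => intro f' v i j hf _; omega
  | succ f ih =>
    intro f' v i j hf hf'
    cases f' with
    | zero => omega
    | succ f' =>
      simp only [pvDfsA]
      split
      · rfl
      · rename_i hguard
        push_neg at hguard
        obtain ⟨hi0, hj0, hin, hjm, hnv, _⟩ := hguard
        have hlt : pvUnvis n m ((i, j) :: v) < pvUnvis n m v :=
          pvUnvis_cons_lt n m i j v hi0 hin hj0 hjm hnv
        exact pv_foldl_congr_inv (fun acc => pvUnvis n m acc ≤ pvUnvis n m ((i, j) :: v))
          _ _ pvDirs ((i, j) :: v) (le_refl _)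
          (fun d acc hacc => by
            constructor
            · exact ih f' acc (i + d.1) (j + d.2) (by omega) (by omega)
            · exact le_trans (pvUnvis_dfs_le grid n m f acc (i + d.1) (j + d.2)) hacc)

theorem pvDirsB_push (i j : Int) (rest : List (Int × Int)) :
    pvDirsB.foldl (fun s d => (i + d.1, j + d.2) :: s) rest =
      pvDirs.map (fun d => (i + d.1, j + d.2)) ++ rest := by
  simp [pvDirsB, pvDirs]

theorem pvFlood_eq (grid : List (List Int)) (n m : Int) :
    ∀ (stack v : List (Int × Int)),
      pvFlood grid n m stack v = stack.foldl (pvDfsF grid n m) v := by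
  intro stack v
  induction stack, v using pvFlood.induct grid n m with
  | case1 v => simp [pvFlood]
  | case2 i j rest v h ih =>
    rw [pvFlood]
    simp only [dif_pos h, List.foldl_cons]
    have hdf : pvDfsF grid n m v (i, j) = v := by
      unfold pvDfsF
      simp only [pvDfsA]
      rw [if_pos h]
    rw [ih, hdf]
  | case3 i j rest v h ih =>
    rw [pvFlood]
    simp only [dif_neg h]
    rw [ih, pvDirsB_push, List.foldl_append, List.foldl_cons]
    congr 1
    have h' := h
    push_neg at h'
    obtain ⟨hi0, hj0, hin, hjm, hnv, _⟩ := h'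
    have hlt := pvUnvis_cons_lt n m i j v hi0 hin hj0 hjm hnv
    have hdf : pvDfsF grid n m v (i, j) =
        pvDirs.foldl (fun acc d => pvDfsA grid n m (pvUnvis n m v) acc (i + d.1) (j + d.2)) ((i, j) :: v) := by
      unfold pvDfsF
      show pvDfsA grid n m (Nat.succ (pvUnvis n m v)) v i j = _
      simp only [pvDfsA]
      rw [if_neg h]
    rw [List.foldl_map, hdf]
    exact (pv_foldl_congr_inv (fun acc => pvUnvis n m acc ≤ pvUnvis n m ((i, j) :: v))
      _ _ pvDirs ((i, j) :: v) (le_refl _)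
      (fun d acc hacc => by
        constructor
        · exact pvDfsA_fuel grid n m _ _ acc (i + d.1) (j + d.2) (by omega) (by omega)
        · exact le_trans (pvUnvis_dfs_le grid n m _ acc (i + d.1) (j + d.2)) hacc)).symm

theorem pvUnvis_le_all (n m : Int) (v : List (Int × Int)) :
    pvUnvis n m v ≤ (pvAll n m).length :=
  List.countP_le_length

theorem pvDfsA_eq_flood (grid : List (List Int)) (n m : Int) (v : List (Int × Int)) (i j : Int) :
    pvDfsA grid n m ((pvAll n m).length + 1) v i j = pvFlood grid n m [(i, j)] v := by
  rw [pvFlood_eq]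
  simp only [List.foldl_cons, List.foldl_nil]
  unfold pvDfsF
  exact pvDfsA_fuel grid n m _ _ v i j
    (Nat.lt_succ_of_le (pvUnvis_le_all n m v)) (Nat.lt_succ_self _)

-- ===== VERDICT (by name: the statement is the Claim_ definition above) =====
theorem num_islands_with_diagonals_spec : Claim_equal_num_islands_with_diagonals := by
  intro grid _hdom _hpre
  unfold Spec_num_islands_with_diagonals
  unfold num_islands_with_diagonals num_islands_with_diagonals_alt
  simp only [pvDfsA_eq_flood]
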